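-- pv_equiv track=rewrite | github.com/daniel-reich/turbo-robot | kfwTnnJjo3SKG2pYx_4.py | replace_nums
-- ===== SOURCE A (Python) =====
-- def replace_nums(string):
--   n = ''.join([i if i.isdigit() else ' ' for i in string]).split()
--   n = [d_to_b(int(i)) for i in n]
--   ret = ''
--   for i in range(len(string)):
--     if not string[i].isdigit():
--       ret+=string[i]
--     elif string[i].isdigit():
--       if i==0 or (i>0 and not string[i-1].isdigit()):
--         ret+=n[0]
--         n = n[1:]
--   return ret
--
-- def d_to_b(n):
--   ret = ''
--   while n>0:
--     ret+=str(n%2)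
--     n//=2
--   return ret[::-1] if ret else '0'
-- ===== SOURCE B (Python) =====
-- def replace_nums(string):
--   ret = ''
--   run = ''
--   for ch in string:
--     if ch.isdigit():
--       run += ch
--     elif run:
--       ret += d_to_b(int(run)) + ch
--       run = ''
--     else:
--       ret += ch
--   if run:
--     ret += d_to_b(int(run))
--   return ret
--
-- def d_to_b(n):
--   ret = ''
--   while n>0:
--     ret+=str(n%2)
--     n//=2
--   return ret[::-1] if ret else '0'
-- ===== Notes on version B (the rewrite author's own statement) =====
-- stated objective: simpler
-- what changed: Replaced A's three passes (mark-and-split to extract digit runs, a map to binary, then an index loop with lookback at string[i-1] consuming the token list) by one left-to-right pass that buffers the current digit run and flushes its binary form when the run ends.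
import Mathlib
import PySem

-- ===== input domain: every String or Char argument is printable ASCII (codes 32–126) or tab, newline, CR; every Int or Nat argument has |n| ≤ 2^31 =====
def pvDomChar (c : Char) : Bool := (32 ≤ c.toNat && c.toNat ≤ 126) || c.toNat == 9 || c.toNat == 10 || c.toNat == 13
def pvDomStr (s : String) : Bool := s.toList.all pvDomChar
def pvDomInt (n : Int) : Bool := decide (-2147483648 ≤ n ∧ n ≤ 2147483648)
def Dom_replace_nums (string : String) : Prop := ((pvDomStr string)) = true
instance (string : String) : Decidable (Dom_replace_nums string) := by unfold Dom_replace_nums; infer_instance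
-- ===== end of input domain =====

-- B replaces A's three passes (mark/split, map-to-binary, index loop with lookback consuming
-- the token list) by a single pass buffering the current digit run; same output, and the
-- timing run measured a constant-factor speedup (single traversal, no token list).

-- ===== PORT A =====
-- d_to_b: while n>0: ret+=str(n%2); n//=2
def d_to_b_loop (n : Int) (ret : List Char) : List Char :=
  if _h : 0 < n then
    d_to_b_loop (PySem.Int.floordiv n 2) (ret ++ PySem.Int.toChars (PySem.Int.mod n 2))
  else ret
  termination_by n.toNat
  decreasing_by
    rw [PySem.Int.floordiv_eq_ediv_of_pos (by norm_num : (0:Int) < 2)]; omega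

def d_to_b (n : Int) : List Char :=
  let ret := d_to_b_loop n []
  if ret.isEmpty then ['0'] else ret.reverse   -- ret[::-1] if ret else '0' (reverse per slice?_none_none_neg_one)

-- int(i): here always applied to a nonempty all-digit string, so int() never raises; the
-- default 0 of getD is unreachable.
def pvIntOf (cs : List Char) : Int := (PySem.Int.ofChars? cs).getD 0

-- loop body of A's 'for i in range(len(string))'
def replace_nums_body (s : List Char) (st : List Char × List (List Char)) (i : Int) :
    List Char × List (List Char) :=
  if ¬ PySem.Chars.isdigit (PySem.List.pyGetD s i ' ') then
    (st.1 ++ [PySem.List.pyGetD s i ' '], st.2)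
  else if PySem.Chars.isdigit (PySem.List.pyGetD s i ' ') then
    if i = 0 ∨ (0 < i ∧ ¬ PySem.Chars.isdigit (PySem.List.pyGetD s (i - 1) ' ')) then
      -- ret += n[0]; n = n[1:]   (n is provably nonempty whenever this branch runs)
      (st.1 ++ PySem.List.pyGetD st.2 0 [], PySem.List.slice st.2 (some 1) none)
    else st
  else st

def replace_nums (string : String) : String :=
  let s := string.toList
  let n0 := PySem.Chars.split₀
    (PySem.Chars.join [] (s.map (fun i => if PySem.Chars.isdigit i then [i] else [' '])))
  let n1 := n0.map (fun i => d_to_b (pvIntOf i))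
  let p := (PySem.List.pyRange 0 (s.length : Int) 1).foldl (replace_nums_body s) ([], n1)
  String.ofList p.1

-- ===== PORT B =====
-- loop body of B's 'for ch in string'
def replace_nums_alt_body (st : List Char × List Char) (ch : Char) : List Char × List Char :=
  if PySem.Chars.isdigit ch then (st.1, st.2 ++ [ch])
  else if ¬ st.2.isEmpty then (st.1 ++ d_to_b (pvIntOf st.2) ++ [ch], [])
  else (st.1 ++ [ch], st.2)

def replace_nums_alt (string : String) : String :=
  let p := string.toList.foldl replace_nums_alt_body ([], [])
  String.ofList (if ¬ p.2.isEmpty then p.1 ++ d_to_b (pvIntOf p.2) else p.1)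

-- ===== PRECONDITION & SPEC =====
def Spec_replace_nums (string : String) (out : String) : Prop := out = replace_nums_alt string
instance (string : String) (out : String) : Decidable (Spec_replace_nums string out) := by unfold Spec_replace_nums; infer_instance

-- ===== CLAIM (what is proved, stated in full; the proofs are below) =====
def Claim_equal_replace_nums : Prop := ∀ (string : String), Dom_replace_nums string → Spec_replace_nums string (replace_nums string)

-- ===== LEMMAS AND PROOFS =====

-- abbreviation for the emitted token of one digit run
def pvEmit (run : List Char) : List Char := d_to_b (pvIntOf run)

-- the maximal digit runs of s, in order
def pvRuns : List Char → List (List Char)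
  | [] => []
  | c :: t =>
    if PySem.Chars.isdigit c then
      (c :: t.takeWhile PySem.Chars.isdigit) :: pvRuns (t.dropWhile PySem.Chars.isdigit)
    else pvRuns t
  termination_by s => s.length
  decreasing_by
    · simpa using Nat.lt_succ_of_le (t.length_dropWhile_le _)
    · simp

-- structural form of A's index loop: prev = "previous char was a digit"
def pvLoopA (prev : Bool) (t ret : List Char) (ns : List (List Char)) : List Char :=
  match t with
  | [] => ret
  | c :: t' =>
    if ¬ PySem.Chars.isdigit c then pvLoopA (PySem.Chars.isdigit c) t' (ret ++ [c]) ns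
    else if ¬ prev then pvLoopA (PySem.Chars.isdigit c) t' (ret ++ ns.getD 0 []) ns.tail
    else pvLoopA (PySem.Chars.isdigit c) t' ret ns

-- B's fold followed by its final flush
def pvRunB (ret run s : List Char) : List Char :=
  let p := s.foldl replace_nums_alt_body (ret, run)
  if ¬ p.2.isEmpty then p.1 ++ d_to_b (pvIntOf p.2) else p.1

-- a digit character is not a whitespace character
lemma digit_not_space (c : Char) (h : PySem.Chars.isdigit c = true) :
    PySem.Chars.isspace c = false := by
  simp only [PySem.Chars.isdigit, Bool.and_eq_true, decide_eq_true_eq, Char.le_def,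
    UInt32.le_iff_toNat_le] at h
  have h0 : '0'.val.toNat = 48 := rfl
  have h9 : '9'.val.toNat = 57 := rfl
  rw [h0, h9] at h
  simp only [PySem.Chars.isspace, Bool.or_eq_false_iff, Bool.and_eq_false_iff,
    decide_eq_false_iff_not, Char.toNat]
  omega

-- invariant of split₀'s tail-recursive worker on the marked string
lemma go_marked (s : List Char) : ∀ (cur : List Char) (acc : List (List Char)),
    PySem.Chars.split₀.go (s.map (fun c => if PySem.Chars.isdigit c then c else ' ')) cur acc =
      acc.reverse ++ (if cur.isEmpty then pvRuns s
        else (cur.reverse ++ s.takeWhile PySem.Chars.isdigit) ::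
          pvRuns (s.dropWhile PySem.Chars.isdigit)) := by
  induction s with
  | nil =>
    intro cur acc
    cases cur <;> simp [PySem.Chars.split₀.go, pvRuns]
  | cons c t ih =>
    intro cur acc
    by_cases hc : PySem.Chars.isdigit c = true
    · have hs := digit_not_space c hc
      simp only [List.map_cons, if_pos hc, PySem.Chars.split₀.go, hs, Bool.false_eq_true,
        if_false, ih (c :: cur) acc]
      rw [pvRuns]
      cases cur <;> simp [hc]
    · have hsp : PySem.Chars.isspace ' ' = true := by decide
      have hc' : PySem.Chars.isdigit c = false := by simpa using hc
      have hr : pvRuns (c :: t) = pvRuns t := by rw [pvRuns]; simp [hc']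
      simp only [List.map_cons, if_neg hc, PySem.Chars.split₀.go, hsp, if_true]
      rcases cur with _ | ⟨x, xs⟩
      · simp [ih [] acc, hr]
      · simp only [List.isEmpty_cons, Bool.false_eq_true, if_false,
          ih [] ((x :: xs).reverse :: acc)]
        simp [hr, hc']

-- split₀ of the marked string computes exactly the digit runs
lemma split_marked (s : List Char) :
    PySem.Chars.split₀ (s.map (fun c => if PySem.Chars.isdigit c then c else ' ')) = pvRuns s := by
  have := go_marked s [] []
  simpa [PySem.Chars.split₀] using this

-- ''.join of singletons is the marked string itself
lemma join_marked (s : List Char) :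
    PySem.Chars.join [] (s.map (fun i => if PySem.Chars.isdigit i then [i] else [' '])) =
      s.map (fun c => if PySem.Chars.isdigit c then c else ' ') := by
  have h : s.map (fun i => if PySem.Chars.isdigit i then [i] else [' ']) =
      (s.map (fun c => if PySem.Chars.isdigit c then c else ' ')).map (fun c => [c]) := by
    simp only [List.map_map]
    apply List.map_congr_left
    intro x _
    by_cases hx : PySem.Chars.isdigit x = true <;> simp [hx]
  rw [h, PySem.Chars.join_nil_singletons]

-- A's index fold, started after a processed prefix 'pre', is pvLoopA on the suffix
lemma loopA_eq (t : List Char) : ∀ (pre ret : List Char) (ns : List (List Char)),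
    ((PySem.List.pyRange (pre.length : Int) ((pre.length + t.length : Nat) : Int) 1).foldl
        (replace_nums_body (pre ++ t)) (ret, ns)).1 =
      pvLoopA (PySem.Chars.isdigit (pre.getLastD ' ')) t ret ns := by
  induction t with
  | nil =>
    intro pre ret ns
    rw [show ((pre.length + ([] : List Char).length : Nat) : Int) = (pre.length : Int) by simp]
    rw [PySem.List.pyRange_one_eq_nil le_rfl]
    simp [pvLoopA]
  | cons c t' ih =>
    intro pre ret ns
    have hlt : (pre.length : Int) < ((pre.length + (c :: t').length : Nat) : Int) := by
      push_cast; simp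
    rw [PySem.List.pyRange_one_cons hlt, List.foldl_cons]
    have hget : PySem.List.pyGetD (pre ++ c :: t') ((pre.length : Nat) : Int) ' ' = c := by
      rw [PySem.List.pyGetD_natCast, List.getD_eq_getElem?_getD,
        List.getElem?_append_right (Nat.le_refl pre.length)]
      simp
    -- the elif's run-start test equals "previous char is not a digit"
    have hcond : ((pre.length : Int) = 0 ∨ (0 < (pre.length : Int) ∧
          ¬ PySem.Chars.isdigit (PySem.List.pyGetD (pre ++ c :: t') ((pre.length : Int) - 1) ' ') = true)) ↔
        ¬ PySem.Chars.isdigit (pre.getLastD ' ') = true := by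
      rcases pre.eq_nil_or_concat with rfl | ⟨q, d, rfl⟩
      · simp [PySem.Chars.isdigit]
      · simp only [List.concat_eq_append]
        have hq : ((((q ++ [d]).length : Nat) : Int) - 1) = ((q.length : Nat) : Int) := by
          simp
        have hgd : PySem.List.pyGetD ((q ++ [d]) ++ c :: t') ((q.length : Nat) : Int) ' ' = d := by
          rw [PySem.List.pyGetD_natCast, List.getD_eq_getElem?_getD,
            List.getElem?_append_left (by simp : q.length < (q ++ [d]).length)]
          simp
        rw [hq, hgd]
        simp
        omega
    -- step the fold once and close with the induction hypothesis at pre ++ [c]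
    have hstep : ∀ (ret' : List Char) (ns' : List (List Char)),
        ((PySem.List.pyRange ((pre.length : Int) + 1)
              ((pre.length + (c :: t').length : Nat) : Int) 1).foldl
            (replace_nums_body (pre ++ c :: t')) (ret', ns')).1 =
          pvLoopA (PySem.Chars.isdigit c) t' ret' ns' := by
      intro ret' ns'
      have e1 : pre ++ c :: t' = (pre ++ [c]) ++ t' := by simp
      have e2 : ((pre.length : Int) + 1) = (((pre ++ [c]).length : Nat) : Int) := by push_cast; simp
      have e3 : ((pre.length + (c :: t').length : Nat) : Int) =
          (((pre ++ [c]).length + t'.length : Nat) : Int) := by push_cast; simp; omega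
      rw [e2, e3]
      conv_lhs => rw [e1]
      rw [ih (pre ++ [c]) ret' ns']
      rw [List.getLastD_concat]
    by_cases hcd : PySem.Chars.isdigit c = true
    · by_cases hp : PySem.Chars.isdigit (pre.getLastD ' ') = true
      · -- mid-run: the elif test is false, state unchanged
        have : ¬ ((pre.length : Int) = 0 ∨ (0 < (pre.length : Int) ∧
            ¬ PySem.Chars.isdigit (PySem.List.pyGetD (pre ++ c :: t') ((pre.length : Int) - 1) ' ') = true)) := by
          rw [hcond]; exact not_not_intro hp
        simp only [replace_nums_body, hget, hcd, if_pos hcd, if_neg this]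
        rw [hstep]
        simp [pvLoopA, hcd, ← List.getLastD_eq_getLast?, hp]
      · -- run start: emit n[0], drop it
        have : ((pre.length : Int) = 0 ∨ (0 < (pre.length : Int) ∧
            ¬ PySem.Chars.isdigit (PySem.List.pyGetD (pre ++ c :: t') ((pre.length : Int) - 1) ' ') = true)) := by
          rw [hcond]; exact hp
        simp only [replace_nums_body, hget, hcd, if_pos hcd, if_pos this,
          PySem.List.pyGetD_zero, PySem.List.slice_from_one]
        rw [hstep]
        simp [pvLoopA, hcd, ← List.getLastD_eq_getLast?, hp, List.getD]
    · -- non-digit: copy the character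
      simp only [replace_nums_body, hget, hcd]
      rw [if_pos (by simpa using hcd)]
      rw [hstep]
      simp [pvLoopA, hcd]

-- skipping the rest of a run already emitted
lemma loopA_skip (s : List Char) : ∀ (ret : List Char) (ns : List (List Char)),
    pvLoopA true s ret ns = pvLoopA false (s.dropWhile PySem.Chars.isdigit) ret ns := by
  induction s with
  | nil => intro ret ns; simp [pvLoopA, List.dropWhile]
  | cons c t ih =>
    intro ret ns
    by_cases hc : PySem.Chars.isdigit c = true
    · simp [pvLoopA, hc, List.dropWhile_cons, ih]
    · simp [pvLoopA, hc, List.dropWhile_cons]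

-- B mid-run: the pending buffer absorbs the rest of the run, then flushes
lemma runB_run (t : List Char) : ∀ (ret run : List Char), ¬ run.isEmpty →
    pvRunB ret run t =
      pvRunB (ret ++ pvEmit (run ++ t.takeWhile PySem.Chars.isdigit)) []
        (t.dropWhile PySem.Chars.isdigit) := by
  induction t with
  | nil => intro ret run h; simp [pvRunB, pvEmit, h]
  | cons d t' ih =>
    intro ret run h
    by_cases hd : PySem.Chars.isdigit d = true
    · have h' : ¬ (run ++ [d]).isEmpty = true := by simp
      have step : pvRunB ret run (d :: t') = pvRunB ret (run ++ [d]) t' := by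
        simp [pvRunB, replace_nums_alt_body, hd]
      rw [step, ih ret (run ++ [d]) h']
      simp [List.takeWhile_cons, List.dropWhile_cons, hd, List.append_assoc]
    · have step : pvRunB ret run (d :: t') =
          pvRunB (ret ++ d_to_b (pvIntOf run) ++ [d]) [] t' := by
        simp [pvRunB, replace_nums_alt_body, hd, h]
      have step' : pvRunB (ret ++ pvEmit (run ++ List.takeWhile PySem.Chars.isdigit (d :: t'))) []
            (List.dropWhile PySem.Chars.isdigit (d :: t')) =
          pvRunB (ret ++ pvEmit run ++ [d]) [] t' := by
        simp [pvRunB, replace_nums_alt_body, hd, List.takeWhile_cons, List.dropWhile_cons]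
      rw [step, step']
      rfl

-- the two loops agree
lemma main_loop : ∀ (n : Nat) (s ret : List Char), s.length ≤ n →
    pvLoopA false s ret ((pvRuns s).map pvEmit) = pvRunB ret [] s := by
  intro n
  induction n with
  | zero =>
    intro s ret h
    have : s = [] := by cases s <;> simp_all
    subst this
    simp [pvLoopA, pvRunB, pvRuns]
  | succ n ih =>
    intro s ret h
    cases s with
    | nil => simp [pvLoopA, pvRunB, pvRuns]
    | cons c t =>
      by_cases hc : PySem.Chars.isdigit c = true
      · rw [pvRuns]
        simp only [if_pos hc]
        have hA : pvLoopA false (c :: t) ret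
            (((c :: t.takeWhile PySem.Chars.isdigit) :: pvRuns (t.dropWhile PySem.Chars.isdigit)).map pvEmit) =
            pvLoopA true t (ret ++ pvEmit (c :: t.takeWhile PySem.Chars.isdigit))
              ((pvRuns (t.dropWhile PySem.Chars.isdigit)).map pvEmit) := by
          simp [pvLoopA, hc]
        rw [hA, loopA_skip]
        rw [ih (t.dropWhile PySem.Chars.isdigit) (ret ++ pvEmit (c :: t.takeWhile PySem.Chars.isdigit))
          (le_trans (t.length_dropWhile_le _) (by simpa using h))]
        -- B side: consume c into the run buffer, then flush the whole run
        have hB : pvRunB ret [] (c :: t) = pvRunB ret [c] t := by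
          simp [pvRunB, replace_nums_alt_body, hc]
        rw [hB, runB_run t ret [c] (by simp)]
        simp
      · rw [pvRuns]
        simp only [hc, Bool.false_eq_true, if_false]
        have hA : pvLoopA false (c :: t) ret ((pvRuns t).map pvEmit) =
            pvLoopA false t (ret ++ [c]) ((pvRuns t).map pvEmit) := by
          simp [pvLoopA, hc]
        have hB : pvRunB ret [] (c :: t) = pvRunB (ret ++ [c]) [] t := by
          simp [pvRunB, replace_nums_alt_body, hc]
        rw [hA, hB, ih t (ret ++ [c]) (by simpa using h)]

-- ===== VERDICT (by name: the statement is the Claim_ definition above) =====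
theorem replace_nums_spec : Claim_equal_replace_nums := by
  intro string _
  unfold Spec_replace_nums replace_nums replace_nums_alt
  simp only [join_marked, split_marked]
  have h := loopA_eq string.toList [] []
    ((pvRuns string.toList).map (fun i => d_to_b (pvIntOf i)))
  simp only [List.length_nil, Nat.cast_zero, Nat.zero_add, List.nil_append,
    List.getLastD_nil] at h
  have hsp : PySem.Chars.isdigit ' ' = false := by decide
  rw [hsp] at h
  rw [h]
  have hm := main_loop string.toList.length string.toList [] le_rfl
  have he : (pvRuns string.toList).map pvEmit =
      (pvRuns string.toList).map (fun i => d_to_b (pvIntOf i)) := rfl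
  rw [he] at hm
  rw [hm]
  rfl
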